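-- pv_equiv track=rewrite | github.com/WGBH-MLA/transcript_converter | proc_ww.py | make_sts_arr
-- ===== SOURCE A (Python) =====
-- NO_SPACE_BEFORE = ['.', ',', '-', '/']
--
-- def make_sts_arr( toks_arr ):
--     """
--     Takes the token array and combines tokens into their sentences.
--     """
--
--     # empty list of sentences
--     sts_arr = []
--
--     # begin first sentence
--     start = toks_arr[0][0]
--     end = toks_arr[0][1]
--     st = toks_arr[0][2]
--     st_id = toks_arr[0][3]
--
--     for t in toks_arr[1:]:
--         if t[3] == st_id:
--             # Same sentence.  Extend sentence string
--             end = t[1]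
--             if t[2][0] in NO_SPACE_BEFORE:
--                 st += t[2]
--             else:
--                 st += " " + t[2]
--         else:
--             # New sentence id.
--             # Append current sentence to the list
--             sts_arr.append([start, end, st])
--             # Start new sentence
--             start = t[0]
--             end = t[1]
--             st = t[2]
--             st_id = t[3]
--
--     # append final sentence to the list
--     sts_arr.append([start, end, st])
--
--     return sts_arr
-- ===== SOURCE B (Python) =====
-- NO_SPACE_BEFORE = ['.', ',', '-', '/']
--
-- def make_sts_arr(toks_arr):
--     """
--     Run-splitting re-implementation: cut the token list into maximal
--     consecutive runs sharing a sentence id, then render each run.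
--     """
--     sts_arr = []
--     i, n = 0, len(toks_arr)
--     while i < n:
--         j = i + 1
--         while j < n and toks_arr[j][3] == toks_arr[i][3]:
--             j += 1
--         run = toks_arr[i:j]
--         st = run[0][2]
--         for t in run[1:]:
--             st += t[2] if t[2][0] in NO_SPACE_BEFORE else " " + t[2]
--         sts_arr.append([run[0][0], run[-1][1], st])
--         i = j
--     return sts_arr
-- ===== Notes on version B (the rewrite author's own statement) =====
-- stated objective: alternative
-- what changed: Replaces A's single-pass five-variable state machine (start/end/st/st_id carried across the whole loop with a flush on id change) by a run-splitting decomposition: first cut the list into maximal consecutive runs of equal sentence id, then render each run independently (first token's start, last token's end, joined text).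
import Mathlib
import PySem

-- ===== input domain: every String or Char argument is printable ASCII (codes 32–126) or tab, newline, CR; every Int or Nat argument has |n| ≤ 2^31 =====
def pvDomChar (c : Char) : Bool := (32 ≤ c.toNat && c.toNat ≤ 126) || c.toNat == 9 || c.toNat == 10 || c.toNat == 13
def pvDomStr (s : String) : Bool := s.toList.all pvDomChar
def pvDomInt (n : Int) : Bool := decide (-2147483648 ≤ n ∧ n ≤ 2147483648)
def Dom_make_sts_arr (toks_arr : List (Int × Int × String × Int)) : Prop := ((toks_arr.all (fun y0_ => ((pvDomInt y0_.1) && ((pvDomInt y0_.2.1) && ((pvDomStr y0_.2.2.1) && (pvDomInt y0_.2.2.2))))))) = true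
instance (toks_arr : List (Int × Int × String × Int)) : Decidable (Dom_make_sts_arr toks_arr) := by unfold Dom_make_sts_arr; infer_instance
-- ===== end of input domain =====

-- B changes the decomposition (run-splitting + per-run rendering instead of A's
-- flushing state machine); equal on Pre_, and B returns [] where A raises on [].

-- shared transliteration of "t[2][0] in NO_SPACE_BEFORE"; Python raises on t[2] = "",
-- Pre_ excludes those inputs, so the none branch is arbitrary (false).
def pvNoSpaceBefore (s : String) : Bool :=
  match PySem.Str.pyGet? s 0 with
  | some c => c ∈ ['.', ',', '-', '/']
  | none => false

-- "t[2]" / '" " + t[2]' appended to the sentence string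
def pvApp (t : Int × Int × String × Int) : String :=
  if pvNoSpaceBefore t.2.2.1 then t.2.2.1 else " " ++ t.2.2.1

-- ===== PORT A =====
-- A's for-loop over toks_arr[1:] with state (sts_arr, start, end, st, st_id)
def pvALoop (ts : List (Int × Int × String × Int)) (acc : List (Int × Int × String))
    (s e : Int) (st : String) (st_id : Int) : List (Int × Int × String) :=
  match ts with
  | [] => acc ++ [(s, e, st)]
  | t :: rest =>
    if t.2.2.2 == st_id then
      pvALoop rest acc s t.2.1 (st ++ pvApp t) st_id
    else
      pvALoop rest (acc ++ [(s, e, st)]) t.1 t.2.1 t.2.2.1 t.2.2.2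

def make_sts_arr (toks_arr : List (Int × Int × String × Int)) : List (Int × Int × String) :=
  match toks_arr with
  | [] => []   -- Python raises IndexError at toks_arr[0]; excluded by Pre_
  | t :: rest => pvALoop rest [] t.1 t.2.1 t.2.2.1 t.2.2.2

-- ===== PORT B =====
-- st built over run[1:] (Source B's inner for-loop)
def pvJoinRun (st : String) (run : List (Int × Int × String × Int)) : String :=
  run.foldl (fun a t => a ++ pvApp t) st

-- run[-1][1], with run's head end as the value for the singleton run
def pvLastEnd (e : Int) (run : List (Int × Int × String × Int)) : Int :=
  match run.getLast? with
  | some t => t.2.1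
  | none => e

-- Source B's outer while-loop: cut off the maximal run headed by t, render, recurse
def pvBGo (ts : List (Int × Int × String × Int)) : List (Int × Int × String) :=
  match ts with
  | [] => []
  | t :: rest =>
    let run := rest.takeWhile (fun u => u.2.2.2 == t.2.2.2)
    let more := rest.dropWhile (fun u => u.2.2.2 == t.2.2.2)
    (t.1, pvLastEnd t.2.1 run, pvJoinRun t.2.2.1 run) :: pvBGo more
termination_by ts.length
decreasing_by
  simp only [List.length_cons]
  exact Nat.lt_succ_of_le (List.length_dropWhile_le _ _)

def make_sts_arr_alt (toks_arr : List (Int × Int × String × Int)) : List (Int × Int × String) :=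
  pvBGo toks_arr

-- ===== PRECONDITION & SPEC =====
-- Pre_ excludes exactly the inputs where the Python A raises IndexError: the empty
-- list (toks_arr[0]) and lists where some token following a same-sentence-id token
-- has an empty text field (t[2][0]); B raises on the latter too.
def Pre_make_sts_arr (toks_arr : List (Int × Int × String × Int)) : Prop :=
  toks_arr ≠ [] ∧
  List.IsChain (fun p t => p.2.2.2 = t.2.2.2 → t.2.2.1 ≠ "") toks_arr
instance (toks_arr : List (Int × Int × String × Int)) : Decidable (Pre_make_sts_arr toks_arr) := by
  unfold Pre_make_sts_arr; infer_instance

def pvWitness_make_sts_arr : (List (Int × Int × String × Int)) :=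
  [(0, 5, "Hi", 1), (6, 11, "there", 1), (11, 12, ".", 1), (13, 16, "New", 2)]

def Spec_make_sts_arr (toks_arr : List (Int × Int × String × Int)) (out : List (Int × Int × String)) : Prop := out = make_sts_arr_alt toks_arr
instance (toks_arr : List (Int × Int × String × Int)) (out : List (Int × Int × String)) : Decidable (Spec_make_sts_arr toks_arr out) := by unfold Spec_make_sts_arr; infer_instance

-- ===== CLAIM (what is proved, stated in full; the proofs are below) =====
def Claim_equal_make_sts_arr : Prop := ∀ (toks_arr : List (Int × Int × String × Int)), Dom_make_sts_arr toks_arr → Pre_make_sts_arr toks_arr → Spec_make_sts_arr toks_arr (make_sts_arr toks_arr)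
-- ===== LEMMAS AND PROOFS =====

-- A's loop, run from any state, produces the accumulator followed by the sentence of
-- the current run (extended by ts's leading same-id tokens) and then B's rendering
-- of the remaining tokens.
-- singleton-vs-longer-run bookkeeping for the run's last end offset
theorem pvLastEnd_cons (e : Int) (t : Int × Int × String × Int)
    (r : List (Int × Int × String × Int)) : pvLastEnd e (t :: r) = pvLastEnd t.2.1 r := by
  cases r <;> simp [pvLastEnd, List.getLast?_cons]

-- A's loop, run from any state, produces the accumulator followed by the sentence of
-- the current run (extended by ts's leading same-id tokens) and then B's rendering
-- of the remaining tokens.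
theorem pvALoop_eq (ts : List (Int × Int × String × Int)) :
    ∀ (acc : List (Int × Int × String)) (s e : Int) (st : String) (st_id : Int),
    pvALoop ts acc s e st st_id =
      acc ++ (s, pvLastEnd e (ts.takeWhile (fun u => u.2.2.2 == st_id)),
              pvJoinRun st (ts.takeWhile (fun u => u.2.2.2 == st_id))) ::
        pvBGo (ts.dropWhile (fun u => u.2.2.2 == st_id)) := by
  induction ts with
  | nil => intro acc s e st st_id; simp [pvALoop, pvBGo, pvLastEnd, pvJoinRun]
  | cons t rest ih =>
    intro acc s e st st_id
    by_cases h : t.2.2.2 == st_id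
    · rw [pvALoop]
      simp only [h, List.takeWhile_cons, List.dropWhile_cons, if_true]
      rw [ih, pvLastEnd_cons]
      rfl
    · have hb : (t.2.2.2 == st_id) = false := by simpa using h
      simp only [pvALoop, hb, List.takeWhile_cons, List.dropWhile_cons, Bool.false_eq_true,
        if_false]
      rw [ih]
      conv_rhs => rw [pvBGo.eq_def]
      simp [pvLastEnd, pvJoinRun]

theorem make_sts_arr_spec : Claim_equal_make_sts_arr := by
  intro toks _hd hp
  unfold Spec_make_sts_arr
  match toks, hp with
  | t :: rest, _ =>
    show pvALoop rest [] t.1 t.2.1 t.2.2.1 t.2.2.2 = make_sts_arr_alt (t :: rest)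
    rw [pvALoop_eq]
    simp [make_sts_arr_alt, pvBGo]
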